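-- pv_equiv track=rewrite | github.com/Daoud-youssef/mathsbooklet | assets/components.py | simplify_surd
-- ===== SOURCE A (Python) =====
-- import math
--
-- def simplify_surd(n):
--     """
--     Return (coeff, radicand) in simplest form.
--     e.g. simplify_surd(200) → (10, 2)
--          simplify_surd(48)  → (4, 3)
--          simplify_surd(7)   → (1, 7)
--     """
--     n = int(n)
--     best = 1
--     for k in range(2, int(math.isqrt(n)) + 1):
--         if n % (k * k) == 0:
--             best = k * k
--     coeff = int(math.isqrt(best))
--     return coeff, n // best
-- ===== SOURCE B (Python) =====
-- import math
--
-- def simplify_surd(n):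
--     """
--     Return (coeff, radicand) in simplest form, by prime factorisation:
--     extract p**(e//2) into the coefficient for each prime power p**e of n.
--     """
--     n = int(n)
--     if n <= 1:
--         return (1, n)
--     coeff, rad, m, p = 1, 1, n, 2
--     while p * p <= m:
--         if m % p == 0:
--             e = 0
--             while m % p == 0:
--                 m //= p
--                 e += 1
--             coeff *= p ** (e // 2)
--             rad *= p ** (e % 2)
--         p += 1
--     if m > 1:
--         rad *= m
--     return (coeff, rad)
-- ===== Notes on version B (the rewrite author's own statement) =====
-- stated objective: alternative
-- what changed: A scans every candidate k up to isqrt(n) testing whether k*k divides n and keeps the last hit; B factors n by trial division, dividing each prime out of n as it is found (so the remaining bound sqrt(m) shrinks), and assembles coeff and radicand from the prime exponents.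
-- crash fix: On negative n A raises ValueError (math.isqrt rejects negatives); B returns (1, n). — e.g. on simplify_surd(-5): A raises ValueError, B returns (1, -5)
import Mathlib
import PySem

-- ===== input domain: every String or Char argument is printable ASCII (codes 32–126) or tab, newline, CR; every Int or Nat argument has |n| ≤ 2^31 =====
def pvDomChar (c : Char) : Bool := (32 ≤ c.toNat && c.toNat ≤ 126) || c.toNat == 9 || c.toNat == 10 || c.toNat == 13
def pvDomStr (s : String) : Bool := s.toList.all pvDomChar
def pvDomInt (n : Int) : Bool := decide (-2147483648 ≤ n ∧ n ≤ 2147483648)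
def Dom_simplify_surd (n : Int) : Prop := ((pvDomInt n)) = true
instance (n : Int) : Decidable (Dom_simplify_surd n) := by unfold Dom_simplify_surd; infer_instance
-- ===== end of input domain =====

-- B replaces A's full scan of candidate square factors up to isqrt(n) by trial-division
-- factorisation (coeff = prod p^(e//2), radicand = prod p^(e%2)); A = B is proved for nonnegative n.

-- ===== PORT A =====
-- math.isqrt raises ValueError for n < 0 (excluded by Pre_); for 0 ≤ n it is Nat.sqrt n.toNat (exact).
def simplify_surd (n : Int) : Int × Int :=
  let best : Int :=
    (PySem.List.pyRange 2 ((Nat.sqrt n.toNat : Int) + 1) 1).foldl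
      (fun best k => if PySem.Int.mod n (k * k) == 0 then k * k else best) 1
  let coeff : Int := (Nat.sqrt best.toNat : Int)
  (coeff, PySem.Int.floordiv n best)

-- ===== PORT B =====
-- inner 'while m % p == 0: m //= p; e += 1' of Source B (m, p stay positive Nats there)
def pvStrip (m p : Nat) : Nat × Nat :=
  if h : 2 ≤ p ∧ 0 < m ∧ p ∣ m then
    let r := pvStrip (m / p) p
    (r.1, r.2 + 1)
  else (m, 0)
termination_by m
decreasing_by exact Nat.div_lt_self h.2.1 h.1

theorem pvStrip_fst_le : ∀ m p : Nat, (pvStrip m p).1 ≤ m := by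
  intro m
  induction m using Nat.strong_induction_on with
  | _ m ih =>
    intro p
    rw [pvStrip]
    split
    · next h =>
      exact le_trans (ih (m / p) (Nat.div_lt_self h.2.1 h.1) p) (Nat.div_le_self _ _)
    · exact le_refl m

theorem pvStrip_fst_lt (m p : Nat) (h2 : 2 ≤ p) (hm : 0 < m) (hd : p ∣ m) :
    (pvStrip m p).1 < m := by
  rw [pvStrip, dif_pos ⟨h2, hm, hd⟩]
  exact lt_of_le_of_lt (pvStrip_fst_le (m / p) p) (Nat.div_lt_self hm h2)

-- outer 'while p * p <= m' of Source B; the '2 ≤ p' conjunct only makes the loop total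
-- (p starts at 2 and only increments, so it always holds on the calls the port makes)
def pvFacLoop (m p coeff rad : Nat) : Nat × Nat :=
  if h : 2 ≤ p ∧ p * p ≤ m then
    if hp : p ∣ m then
      let r := pvStrip m p
      pvFacLoop r.1 (p + 1) (coeff * p ^ (r.2 / 2)) (rad * p ^ (r.2 % 2))
    else
      pvFacLoop m (p + 1) coeff rad
  else (coeff, if 1 < m then rad * m else rad)
termination_by (m, m - p)
decreasing_by
  · exact Prod.Lex.left _ _ (pvStrip_fst_lt m p h.1 (by nlinarith [h.1, h.2]) hp)
  · refine Prod.Lex.right m ?_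
    have hpm : p < m := by nlinarith [h.1, h.2]
    omega

def simplify_surd_alt (n : Int) : Int × Int :=
  if n ≤ 1 then (1, n)
  else
    let r := pvFacLoop n.toNat 2 1 1
    ((r.1 : Int), (r.2 : Int))

-- ===== PRECONDITION & SPEC =====
-- math.isqrt raises ValueError for negative n, so A raises exactly on the negatives.
def Pre_simplify_surd (n : Int) : Prop := 0 ≤ n
instance (n : Int) : Decidable (Pre_simplify_surd n) := by unfold Pre_simplify_surd; infer_instance
def pvWitness_simplify_surd : Int := 48

-- On negative n A raises ValueError (math.isqrt rejects negatives); B returns (1, n).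
def Raises_simplify_surd (n : Int) : Prop := n < 0
instance (n : Int) : Decidable (Raises_simplify_surd n) := by unfold Raises_simplify_surd; infer_instance
def pvRaiseWitness_simplify_surd : Int := -5
def pvRaiseWitnessOut_simplify_surd : Int × Int := (1, -5)

def Spec_simplify_surd (n : Int) (out : Int × Int) : Prop := out = simplify_surd_alt n
instance (n : Int) (out : Int × Int) : Decidable (Spec_simplify_surd n out) := by unfold Spec_simplify_surd; infer_instance

-- ===== CLAIM (what is proved, stated in full; the proofs are below) =====
def Claim_equal_simplify_surd : Prop :=
  ∀ (n : Int), Dom_simplify_surd n → Pre_simplify_surd n → Spec_simplify_surd n (simplify_surd n)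

def Claim_raises_simplify_surd : Prop :=
  (∀ (n : Int), Dom_simplify_surd n → Raises_simplify_surd n → ¬ Pre_simplify_surd n) ∧
  (Dom_simplify_surd (pvRaiseWitness_simplify_surd) ∧ Raises_simplify_surd (pvRaiseWitness_simplify_surd) ∧
   simplify_surd_alt (pvRaiseWitness_simplify_surd) = pvRaiseWitnessOut_simplify_surd)

-- ===== LEMMAS AND PROOFS =====

theorem pvStrip_spec (m : Nat) : ∀ p : Nat, 2 ≤ p → 0 < m →
    m = (pvStrip m p).1 * p ^ (pvStrip m p).2 ∧ ¬ p ∣ (pvStrip m p).1 ∧ 0 < (pvStrip m p).1 := by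
  induction m using Nat.strong_induction_on with
  | _ m ih =>
    intro p h2 hm
    rw [pvStrip]
    by_cases hd : p ∣ m
    · rw [dif_pos ⟨h2, hm, hd⟩]
      have hple : p ≤ m := Nat.le_of_dvd hm hd
      have hlt : m / p < m := Nat.div_lt_self hm h2
      have hpos : 0 < m / p := Nat.div_pos hple (by omega)
      obtain ⟨he, hnd, hp1⟩ := ih (m / p) hlt p h2 hpos
      refine ⟨?_, hnd, hp1⟩
      have : m = m / p * p := (Nat.div_mul_cancel hd).symm
      calc m = m / p * p := this
        _ = (pvStrip (m / p) p).1 * p ^ (pvStrip (m / p) p).2 * p := by rw [← he]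
        _ = (pvStrip (m / p) p).1 * p ^ ((pvStrip (m / p) p).2 + 1) := by ring
    · rw [dif_neg (by tauto)]
      exact ⟨by simp, hd, hm⟩

theorem pvFacLoop_spec : ∀ m p coeff rad : Nat, 2 ≤ p → 0 < m →
    (∀ q, Nat.Prime q → q ∣ m → p ≤ q) →
    ∃ C R, pvFacLoop m p coeff rad = (coeff * C, rad * R) ∧ C * C * R = m ∧ Squarefree R ∧
      (∀ q, Nat.Prime q → q ∣ R → p ≤ q) := by
  intro m p coeff rad
  fun_induction pvFacLoop m p coeff rad with
  | case1 m p coeff rad h hp r ih =>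
    intro h2 hm hfac
    obtain ⟨hme, hnd, hr1⟩ : m = r.1 * p ^ r.2 ∧ ¬ p ∣ r.1 ∧ 0 < r.1 := pvStrip_spec m p h.1 hm
    have he1 : 1 ≤ r.2 := by
      by_contra h0
      have : r.2 = 0 := by omega
      rw [this, pow_zero, mul_one] at hme
      exact hnd (hme ▸ hp)
    have hpprime : Nat.Prime p := by
      have hq := Nat.minFac_prime (by omega : p ≠ 1)
      have h1 : p ≤ Nat.minFac p := hfac _ hq ((Nat.minFac_dvd p).trans hp)
      have h2' : Nat.minFac p ≤ p := Nat.minFac_le (by omega)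
      have : Nat.minFac p = p := le_antisymm h2' h1
      exact this ▸ hq
    have hfac' : ∀ q, Nat.Prime q → q ∣ r.1 → p + 1 ≤ q := by
      intro q hq hqd
      have hqm : q ∣ m := hqd.trans ⟨p ^ r.2, hme⟩
      have := hfac q hq hqm
      have hqne : q ≠ p := fun he => hnd (he ▸ hqd)
      omega
    obtain ⟨C', R', heq, hCR, hsq, hge⟩ := ih (by omega) hr1 hfac'
    refine ⟨p ^ (r.2 / 2) * C', p ^ (r.2 % 2) * R', ?_, ?_, ?_, ?_⟩
    · rw [heq, Prod.mk.injEq]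
      constructor <;> ring
    · have h2e : 2 * (r.2 / 2) + r.2 % 2 = r.2 := by omega
      calc p ^ (r.2 / 2) * C' * (p ^ (r.2 / 2) * C') * (p ^ (r.2 % 2) * R')
          = p ^ (2 * (r.2 / 2) + r.2 % 2) * (C' * C' * R') := by
            rw [pow_add, two_mul, pow_add]; ring
        _ = p ^ r.2 * r.1 := by rw [h2e, hCR]
        _ = m := by rw [hme]; ring
    · have hpR' : ¬ p ∣ R' := by
        intro hd
        have := hge p hpprime hd
        omega
      rcases Nat.lt_or_ge (r.2 % 2) 1 with hlt | hge1
      · have : r.2 % 2 = 0 := by omega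
        rw [this, pow_zero, one_mul]; exact hsq
      · have : r.2 % 2 = 1 := by omega
        rw [this, pow_one]
        exact Nat.squarefree_mul_iff.mpr
          ⟨(Nat.Prime.coprime_iff_not_dvd hpprime).mpr hpR', hpprime.squarefree, hsq⟩
    · intro q hq hd
      rcases (Nat.Prime.dvd_mul hq).mp hd with h' | h'
      · have : q = p := by
          rcases Nat.lt_or_ge (r.2 % 2) 1 with hlt | hge1
          · have h0 : r.2 % 2 = 0 := by omega
            rw [h0, pow_zero] at h'
            exact absurd (Nat.eq_one_of_dvd_one h') hq.ne_one
          · have h1' : r.2 % 2 = 1 := by omega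
            rw [h1', pow_one] at h'
            exact (Nat.prime_dvd_prime_iff_eq hq hpprime).mp h'
        omega
      · have := hge q hq h'
        omega
  | case2 m p coeff rad h hp ih =>
    intro h2 hm hfac
    have hfac' : ∀ q, Nat.Prime q → q ∣ m → p + 1 ≤ q := by
      intro q hq hqd
      have := hfac q hq hqd
      rcases Nat.lt_or_ge p q with h' | h'
      · omega
      · have : q = p := le_antisymm h' this
        exact absurd (this ▸ hqd) hp
    obtain ⟨C, R, heq, hCR, hsq, hge⟩ := ih (by omega) hm hfac'
    exact ⟨C, R, heq, hCR, hsq, fun q hq hd => by have := hge q hq hd; omega⟩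
  | case3 m p coeff rad h =>
    intro h2 hm hfac
    push Not at h
    have hpp : m < p * p := h h2
    by_cases h1 : 1 < m
    · -- m is prime: its least prime factor q ≥ p and m/q would force m ≥ p*p
      have hq := Nat.minFac_prime (by omega : m ≠ 1)
      have hqd : Nat.minFac m ∣ m := Nat.minFac_dvd m
      have hqp : p ≤ Nat.minFac m := hfac _ hq hqd
      have hmprime : Nat.Prime m := by
        by_contra hnp
        have h2m : 2 ≤ m := h1
        obtain ⟨q', hq', hq'd⟩ := Nat.exists_prime_and_dvd (by omega : m ≠ 1)
        have hcop : m / Nat.minFac m ≠ 1 := by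
          intro hone
          exact hnp (by
            have : m = Nat.minFac m := by
              have := Nat.div_mul_cancel hqd
              rw [hone, one_mul] at this
              omega
            rw [this]; exact hq)
        obtain ⟨r', hr', hr'd⟩ := Nat.exists_prime_and_dvd hcop
        have hr'm : r' ∣ m := hr'd.trans (Nat.div_dvd_of_dvd hqd)
        have hr'p : p ≤ r' := hfac _ hr' hr'm
        have hle : r' ≤ m / Nat.minFac m :=
          Nat.le_of_dvd (Nat.div_pos (Nat.minFac_le (by omega)) (Nat.minFac_pos m)) hr'd
        have : p * p ≤ Nat.minFac m * (m / Nat.minFac m) := by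
          calc p * p ≤ Nat.minFac m * r' := Nat.mul_le_mul hqp hr'p
            _ ≤ Nat.minFac m * (m / Nat.minFac m) := Nat.mul_le_mul_left _ hle
        rw [Nat.mul_div_cancel' hqd] at this
        omega
      refine ⟨1, m, ?_, by ring, hmprime.squarefree, ?_⟩
      · simp [if_pos h1]
      · intro q hq hd
        have : q = m := (Nat.prime_dvd_prime_iff_eq hq hmprime).mp hd
        exact this ▸ hfac m hmprime (dvd_refl m)
    · have hm1 : m = 1 := by omega
      subst hm1
      refine ⟨1, 1, ?_, by ring, squarefree_one, ?_⟩
      · simp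
      · intro q hq hd
        exact absurd (Nat.eq_one_of_dvd_one hd) hq.ne_one

-- uniqueness of the representation N = C²·R with R squarefree
theorem sq_rep_unique (N C R C' R' : Nat) (hN : 0 < N)
    (h1 : C * C * R = N) (h2 : C' * C' * R' = N)
    (hR : Squarefree R) (hR' : Squarefree R') : C = C' ∧ R = R' := by
  have haux : ∀ A S B T : Nat, A ≠ 0 → S ≠ 0 → B ≠ 0 → T ≠ 0 →
      A * A * S = B * B * T → Squarefree T → A ∣ B := by
    intro A S B T hA hS hB hT heq hsqT
    rw [← Nat.factorization_le_iff_dvd hA hB]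
    rw [Finsupp.le_def]
    intro q
    have hf : (A * A * S).factorization = (B * B * T).factorization := by rw [heq]
    have h1 : (A * A * S).factorization q = A.factorization q + A.factorization q + S.factorization q := by
      rw [Nat.factorization_mul (by positivity) hS, Nat.factorization_mul hA hA]
      simp
    have h2 : (B * B * T).factorization q = B.factorization q + B.factorization q + T.factorization q := by
      rw [Nat.factorization_mul (by positivity) hT, Nat.factorization_mul hB hB]
      simp
    have h3 : T.factorization q ≤ 1 := hsqT.natFactorization_le_one q
    have hq : (A * A * S).factorization q = (B * B * T).factorization q := by rw [hf]
    omega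
  have hC : C ≠ 0 := by rintro rfl; simp at h1; omega
  have hC' : C' ≠ 0 := by rintro rfl; simp at h2; omega
  have hRne : R ≠ 0 := by rintro rfl; simp at h1; omega
  have hR'ne : R' ≠ 0 := by rintro rfl; simp at h2; omega
  have hd1 : C ∣ C' := haux C R C' R' hC hRne hC' hR'ne (h1.trans h2.symm) hR'
  have hd2 : C' ∣ C := haux C' R' C R hC' hR'ne hC hRne (h2.trans h1.symm) hR
  have hCC : C = C' := Nat.dvd_antisymm hd1 hd2
  refine ⟨hCC, ?_⟩
  subst hCC
  have : C * C * R = C * C * R' := h1.trans h2.symm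
  exact Nat.eq_of_mul_eq_mul_left (by positivity) this

-- characterisation of A's fold: result is the largest square (≥ 4) dividing N, else 1
theorem foldA_spec (n : Int) (N : Nat) (hn : n = (N : Int)) (_hN : 2 ≤ N) :
    ∀ k : Nat, 1 ≤ k →
    ∃ j : Nat, 1 ≤ j ∧ j ≤ k ∧ j * j ∣ N ∧
      (PySem.List.pyRange 2 ((k : Int) + 1) 1).foldl
        (fun best x => if PySem.Int.mod n (x * x) == 0 then x * x else best) 1 = ((j * j : Nat) : Int) ∧
      (∀ d : Nat, 2 ≤ d → d ≤ k → d * d ∣ N → d * d ≤ j * j) := by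
  have hmodiff : ∀ x : Nat, ((PySem.Int.mod n ((x : Int) * x) == 0) = true) ↔ x * x ∣ N := by
    intro x
    rw [beq_iff_eq, PySem.Int.mod_eq_zero_iff_dvd, hn,
      show ((x : Int) * x) = ((x * x : Nat) : Int) from by push_cast; ring,
      Int.natCast_dvd_natCast]
  intro k hk
  induction k, hk using Nat.le_induction with
  | base =>
    refine ⟨1, le_refl 1, le_refl 1, by simp, ?_, ?_⟩
    · rw [show ((1 : Nat) : Int) + 1 = 2 from by norm_num, PySem.List.pyRange_one_eq_nil (le_refl 2)]
      simp
    · intro d hd2 hd1 _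
      omega
  | succ k hk ih =>
    obtain ⟨j, hj1, hjk, hjd, hfold, hmax⟩ := ih
    have hsplit : PySem.List.pyRange 2 (((k + 1 : Nat) : Int) + 1) 1 =
        PySem.List.pyRange 2 ((k : Int) + 1) 1 ++ [(k : Int) + 1] := by
      rw [show (((k + 1 : Nat) : Int) + 1) = ((k : Int) + 1) + 1 from by push_cast; ring]
      exact PySem.List.pyRange_one_succ_right (by exact_mod_cast Nat.le_add_left 2 (k - 1) |>.trans (by omega))
    rw [hsplit, List.foldl_append, hfold]
    simp only [List.foldl]
    rw [show ((k : Int) + 1) = ((k + 1 : Nat) : Int) from by push_cast; ring]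
    by_cases hdvd : (k + 1) * (k + 1) ∣ N
    · rw [if_pos ((hmodiff (k + 1)).mpr hdvd)]
      refine ⟨k + 1, by omega, le_refl _, hdvd, by push_cast; ring, ?_⟩
      intro d hd2 hdk hdd
      exact Nat.mul_le_mul hdk hdk
    · rw [if_neg (fun hc => hdvd ((hmodiff (k + 1)).mp hc))]
      refine ⟨j, hj1, by omega, hjd, rfl, ?_⟩
      intro d hd2 hdk hdd
      rcases Nat.lt_or_ge d (k + 1) with h' | h'
      · exact hmax d hd2 (by omega) hdd
      · have : d = k + 1 := by omega
        exact absurd (this ▸ hdd) hdvd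

-- ===== VERDICT (by name: the statement is the Claim_ definition above) =====
theorem simplify_surd_spec : Claim_equal_simplify_surd := by
  intro n _ hpre
  unfold Pre_simplify_surd at hpre
  unfold Spec_simplify_surd
  obtain ⟨N, rfl⟩ : ∃ N : Nat, n = (N : Int) := ⟨n.toNat, (Int.toNat_of_nonneg hpre).symm⟩
  rcases Nat.lt_or_ge N 2 with hN | hN
  · interval_cases N <;> decide
  · obtain ⟨j, hj1, hjs, hjd, hfold, hmax⟩ :=
      foldA_spec ((N : Int)) N rfl hN (Nat.sqrt N) (Nat.sqrt_pos.mpr (by omega))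
    have hjj : j * j * (N / (j * j)) = N := Nat.mul_div_cancel' hjd
    -- A's radicand is squarefree by maximality of j*j
    have hsqA : Squarefree (N / (j * j)) := by
      intro x hx
      rw [Nat.isUnit_iff]
      by_contra hx1
      have hx0 : x ≠ 0 := by
        rintro rfl
        rw [zero_mul, zero_dvd_iff] at hx
        rw [hx, mul_zero] at hjj
        omega
      have hx2 : 2 ≤ x := by omega
      have hdd : (j * x) * (j * x) ∣ N := by
        have h' : (j * j) * (x * x) ∣ (j * j) * (N / (j * j)) := mul_dvd_mul_left _ hx
        rw [hjj] at h'
        have he : (j * x) * (j * x) = (j * j) * (x * x) := by ring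
        rw [he]
        exact h'
      have hjxs : j * x ≤ Nat.sqrt N := Nat.le_sqrt.mpr (Nat.le_of_dvd (show 0 < N by omega) hdd)
      have hle := hmax (j * x) (by nlinarith) hjxs hdd
      have he2 : (j * j) * (x * x) ≤ j * j := by
        rw [show (j * j) * (x * x) = j * x * (j * x) from by ring]
        exact hle
      have h4 : 4 ≤ x * x := by nlinarith
      have h5 : (j * j) * 4 ≤ (j * j) * (x * x) := Nat.mul_le_mul (le_refl _) h4
      have h6 : 1 * 1 ≤ j * j := Nat.mul_le_mul hj1 hj1
      omega
    have hA : simplify_surd ((N : Int)) = ((j : Int), ((N / (j * j) : Nat) : Int)) := by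
      unfold simplify_surd
      rw [show ((N : Int)).toNat = N from Int.toNat_natCast N, hfold, Prod.mk.injEq]
      constructor
      · rw [show (((j * j : Nat) : Int)).toNat = j * j from Int.toNat_natCast _, Nat.sqrt_eq j]
      · exact PySem.Int.floordiv_natCast N (j * j)
    obtain ⟨C, R, heq, hCR, hsq, _⟩ :=
      pvFacLoop_spec N 2 1 1 (le_refl 2) (by omega) (fun q hq _ => hq.two_le)
    obtain ⟨hCj, hRr⟩ := sq_rep_unique N C R j (N / (j * j)) (by omega) hCR hjj hsq hsqA
    have hB : simplify_surd_alt ((N : Int)) = ((j : Int), ((N / (j * j) : Nat) : Int)) := by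
      unfold simplify_surd_alt
      rw [if_neg (by exact_mod_cast (by omega : ¬ (N : Int) ≤ 1))]
      rw [show ((N : Int)).toNat = N from Int.toNat_natCast N, heq]
      rw [one_mul, one_mul, hCj, hRr]
    rw [hA, hB]

@[simp] theorem simplify_surd_raises : Claim_raises_simplify_surd := by
  unfold Claim_raises_simplify_surd
  exact ⟨fun n _ h hp => absurd hp (by unfold Pre_simplify_surd Raises_simplify_surd at *; omega), by decide⟩
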